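-- pv_equiv track=rewrite | github.com/pignak/PythonScripts | python/Formattazione.py | trova
-- ===== SOURCE A (Python) =====
-- def trova(parola):
--     trovata=0
--     ret=''
--     for i in parola:
--         if(i!='%' and trovata==0):
--             ret+=i
--         else:
--             trovata=1
--     return ret
-- ===== SOURCE B (Python) =====
-- def trova(parola):
--     return parola.split('%', 1)[0]
-- ===== Notes on version B (the rewrite author's own statement) =====
-- stated objective: idiomatic
-- what changed: Replaces the manual character loop with its found flag and per-character string concatenation by a single str.split with maxsplit 1 taking the first piece.
import Mathlib
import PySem

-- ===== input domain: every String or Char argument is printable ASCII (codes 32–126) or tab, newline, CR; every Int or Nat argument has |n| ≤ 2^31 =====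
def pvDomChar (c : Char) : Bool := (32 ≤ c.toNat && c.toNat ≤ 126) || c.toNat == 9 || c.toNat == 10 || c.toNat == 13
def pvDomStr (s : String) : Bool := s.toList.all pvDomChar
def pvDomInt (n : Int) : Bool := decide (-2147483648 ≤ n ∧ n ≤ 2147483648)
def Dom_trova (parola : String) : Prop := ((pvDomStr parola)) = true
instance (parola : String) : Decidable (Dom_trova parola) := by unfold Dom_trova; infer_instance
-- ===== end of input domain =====

-- B replaces A's manual loop (accumulator + 'found' flag) by a single split('%', 1)[0] call (idiomatic).

-- ===== PORT A =====
def trovaStep (st : Int × String) (i : Char) : Int × String :=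
  if i ≠ '%' ∧ st.1 = 0 then (st.1, st.2.push i) else (1, st.2)

def trova (parola : String) : String :=
  (parola.toList.foldl trovaStep (0, "")).2

-- ===== PORT B =====
-- parola.split('%', 1)[0]; split with a nonempty separator always returns a
-- nonempty list, so the [0] indexing never raises — ported as headD "".
def trova_alt (parola : String) : String :=
  ((PySem.Str.splitMax? parola "%" 1).getD []).headD ""

-- ===== PRECONDITION & SPEC =====
def Spec_trova (parola : String) (out : String) : Prop := out = trova_alt parola
instance (parola : String) (out : String) : Decidable (Spec_trova parola out) := by unfold Spec_trova; infer_instance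

-- ===== CLAIM (what is proved, stated in full; the proofs are below) =====
def Claim_equal_trova : Prop := ∀ (parola : String), Dom_trova parola → Spec_trova parola (trova parola)

-- ===== LEMMAS AND PROOFS =====

-- once the flag is set, the fold never changes the state
theorem trova_fold_one (cs : List Char) (acc : String) :
    List.foldl trovaStep (1, acc) cs = (1, acc) := by
  induction cs with
  | nil => rfl
  | cons c cs ih => simp [trovaStep, ih]

-- A's fold appends exactly the prefix of cs before the first '%'
theorem trova_fold_zero (cs : List Char) (acc : String) :
    (List.foldl trovaStep (0, acc) cs).2.toList
      = acc.toList ++ cs.takeWhile (· ≠ '%') := by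
  induction cs generalizing acc with
  | nil => simp
  | cons c cs ih =>
    by_cases hc : c = '%'
    · subst hc
      simp [trovaStep, trova_fold_one]
    · simp [trovaStep, hc, ih]

-- splitOnMax.go with maxsplit exhausted returns the remainder as one last piece
theorem go_zero (fuel : Nat) (rest cur : List Char) (acc : List (List Char)) :
    PySem.Chars.splitOnMax.go ['%'] fuel 0 rest cur acc
      = ((cur.reverse ++ rest) :: acc).reverse := by
  cases fuel with
  | zero => rfl
  | succ fuel =>
    cases rest with
    | nil => simp [PySem.Chars.splitOnMax.go]
    | cons c rest => simp [PySem.Chars.splitOnMax.go]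

-- characterisation of splitOnMax.go for sep = ['%'], maxsplit = 1
theorem go_one (cs : List Char) (fuel : Nat) (cur : List Char)
    (acc : List (List Char)) (h : cs.length < fuel) :
    PySem.Chars.splitOnMax.go ['%'] fuel 1 cs cur acc
      = acc.reverse ++ [cur.reverse ++ cs.takeWhile (· ≠ '%')]
          ++ (if '%' ∈ cs then [(cs.dropWhile (· ≠ '%')).drop 1] else []) := by
  induction cs generalizing fuel cur acc with
  | nil =>
    cases fuel with
    | zero => omega
    | succ fuel => simp [PySem.Chars.splitOnMax.go]
  | cons c cs ih =>
    cases fuel with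
    | zero => omega
    | succ fuel =>
      by_cases hc : c = '%'
      · subst hc
        simp [PySem.Chars.splitOnMax.go, List.isPrefixOf, go_zero]
      · have hp : List.isPrefixOf ['%'] (c :: cs) = false := by
          simp [List.isPrefixOf]
          intro h'
          exact hc (Eq.symm h')
        have hlen : cs.length < fuel := by simpa using h
        have hcc : ('%' = c) = False := eq_false (fun h' => hc (Eq.symm h'))
        simp [PySem.Chars.splitOnMax.go, hp, ih fuel (c :: cur) acc hlen, hc, hcc]

theorem trova_alt_toList (parola : String) :
    (trova_alt parola).toList = parola.toList.takeWhile (· ≠ '%') := by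
  unfold trova_alt
  have hsep : ("%" : String).toList = ['%'] := rfl
  simp only [PySem.Str.splitMax?, hsep, PySem.Chars.splitMax?]
  have h1 : ((1 : Int) < 0) = False := by simp
  simp only [PySem.Chars.splitOnMax, h1, if_false, List.isEmpty]
  have ht : (1 : Int).toNat = 1 := rfl
  rw [ht, go_one parola.toList (parola.toList.length + 1) [] [] (by omega)]
  by_cases hm : '%' ∈ parola.toList <;> simp [hm]

-- ===== VERDICT (by name: the statement is the Claim_ definition above) =====
theorem trova_spec : Claim_equal_trova := by
  intro parola _
  unfold Spec_trova
  apply String.ext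
  rw [trova_alt_toList]
  simpa using trova_fold_zero parola.toList ""
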